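-- pv_equiv track=rewrite | github.com/chris2in/csc442TeamPhoenix | programs/timelock.py | findFirstLetters
-- ===== SOURCE A (Python) =====
-- def findFirstLetters(h):
--     a = "abcdef"
--     num = "0123456789"
--     counter1 = 0
--     counter2 = 0
--     L2 = ""
--     # extract and concatenate the first two letters of the hash from left-to-right
--     for i in h:
--         if counter1 < 2:
--             for x in a:
--                 if i == x:
--                     counter1 += 1
--                     L2 += i
--     # extract and concatenate the first two single-digit integers of the hash from right-to-left
--     for j in reversed(h):
--         if counter2 < 2:
--             for x in num:
--                 if j == x:
--                     counter2 += 1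
--                     L2 += j
--     return L2
-- ===== SOURCE B (Python) =====
-- def findFirstLetters(h):
--     letters = []
--     digits = []
--     for c in h:
--         if c in "abcdef" and len(letters) < 2:
--             letters.append(c)
--         elif c in "0123456789":
--             digits.append(c)
--     return "".join(letters) + "".join(digits[::-1][:2])
-- ===== Notes on version B (the rewrite author's own statement) =====
-- stated objective: simpler
-- what changed: One forward pass collecting capped letters and all digits, then takes the last two digits in reverse, replacing A's two passes (one over reversed(h)) each with a nested per-character alphabet scan.
import Mathlib
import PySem

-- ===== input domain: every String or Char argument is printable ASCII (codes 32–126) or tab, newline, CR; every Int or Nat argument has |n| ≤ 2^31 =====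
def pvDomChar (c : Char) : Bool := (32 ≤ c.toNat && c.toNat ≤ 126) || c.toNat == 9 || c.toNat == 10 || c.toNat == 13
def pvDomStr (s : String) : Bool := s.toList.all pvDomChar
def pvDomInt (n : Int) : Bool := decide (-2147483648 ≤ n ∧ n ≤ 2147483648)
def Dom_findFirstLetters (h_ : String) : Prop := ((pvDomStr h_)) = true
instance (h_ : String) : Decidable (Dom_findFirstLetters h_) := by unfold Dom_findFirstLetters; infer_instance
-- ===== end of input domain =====

-- B replaces A's two passes (the second over reversed(h), each with a nested alphabet scan)
-- by one forward pass collecting capped letters and all digits, then taking the last two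
-- digits in reverse; objective: simpler. Return-value equivalence; no argument is mutated.

-- ===== PORT A =====
-- literal transliteration of A: loop over h with an inner loop over "abcdef", then a loop
-- over reversed(h) with an inner loop over "0123456789"; shared accumulator L2, two counters
def findFirstLetters (h_ : String) : String :=
  let s1 : Nat × List Char := h_.toList.foldl
    (fun st i => if st.1 < 2 then
        ("abcdef".toList).foldl (fun st2 x => if i = x then (st2.1 + 1, st2.2 ++ [i]) else st2) st
      else st) (0, [])
  let s2 : Nat × List Char := h_.toList.reverse.foldl
    (fun st j => if st.1 < 2 then
        ("0123456789".toList).foldl (fun st2 x => if j = x then (st2.1 + 1, st2.2 ++ [j]) else st2) st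
      else st) (0, s1.2)
  String.ofList s2.2

-- ===== PORT B =====
-- literal transliteration of Source B: single forward loop over h with (letters, digits) state,
-- then letters ++ digits[::-1][:2]  (slice step -1 = reverse, [:2] = take 2)
def findFirstLetters_alt (h_ : String) : String :=
  let st : List Char × List Char := h_.toList.foldl
    (fun st c =>
      if c ∈ "abcdef".toList ∧ st.1.length < 2 then (st.1 ++ [c], st.2)
      else if c ∈ "0123456789".toList then (st.1, st.2 ++ [c]) else st)
    ([], [])
  String.ofList (st.1 ++ (st.2.reverse.take 2))

-- ===== PRECONDITION & SPEC =====
def Spec_findFirstLetters (h_ : String) (out : String) : Prop := out = findFirstLetters_alt h_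
instance (h_ : String) (out : String) : Decidable (Spec_findFirstLetters h_ out) := by unfold Spec_findFirstLetters; infer_instance

-- ===== CLAIM (what is proved, stated in full; the proofs are below) =====
def Claim_equal_findFirstLetters : Prop := ∀ (h_ : String), Dom_findFirstLetters h_ → Spec_findFirstLetters h_ (findFirstLetters h_)

-- ===== LEMMAS AND PROOFS =====

-- chars of the scanned list that lie in m, collected while fewer than 2 have been taken,
-- starting from count n — the common shape of both programs' capped collection
def cap2 (m : List Char) : List Char → Nat → List Char
  | [], _ => []
  | c :: t, n => if n < 2 ∧ c ∈ m then c :: cap2 m t (n + 1) else cap2 m t n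

-- A's inner scan of "abcdef" bumps the state exactly when i is a hex letter
theorem innerL (i : Char) (st : Nat × List Char) :
    ("abcdef".toList).foldl (fun st2 x => if i = x then (st2.1 + 1, st2.2 ++ [i]) else st2) st
      = if i ∈ "abcdef".toList then (st.1 + 1, st.2 ++ [i]) else st := by
  by_cases h : i ∈ "abcdef".toList
  · rw [if_pos h]
    have h' : i ∈ ['a','b','c','d','e','f'] := h
    fin_cases h' <;> simp [List.foldl]
  · rw [if_neg h]
    have h' : ¬ i ∈ ['a','b','c','d','e','f'] := h
    simp only [List.mem_cons, not_or] at h'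
    simp [List.foldl, h'.1, h'.2.1, h'.2.2.1, h'.2.2.2.1, h'.2.2.2.2.1, h'.2.2.2.2.2]

-- A's inner scan of "0123456789" bumps the state exactly when j is a digit
theorem innerD (j : Char) (st : Nat × List Char) :
    ("0123456789".toList).foldl (fun st2 x => if j = x then (st2.1 + 1, st2.2 ++ [j]) else st2) st
      = if j ∈ "0123456789".toList then (st.1 + 1, st.2 ++ [j]) else st := by
  by_cases h : j ∈ "0123456789".toList
  · rw [if_pos h]
    have h' : j ∈ ['0','1','2','3','4','5','6','7','8','9'] := h
    fin_cases h' <;> simp [List.foldl]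
  · rw [if_neg h]
    have h' : ¬ j ∈ ['0','1','2','3','4','5','6','7','8','9'] := h
    simp only [List.mem_cons, not_or] at h'
    simp [List.foldl, h'.1, h'.2.1, h'.2.2.1, h'.2.2.2.1, h'.2.2.2.2.1, h'.2.2.2.2.2.1,
      h'.2.2.2.2.2.2.1, h'.2.2.2.2.2.2.2.1, h'.2.2.2.2.2.2.2.2.1, h'.2.2.2.2.2.2.2.2.2]

-- A's outer loop (inner scan collapsed) computes cap2 and the count it adds
theorem foldStep (m : List Char) (cs : List Char) (n : Nat) (L : List Char) :
    cs.foldl (fun (st : Nat × List Char) i =>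
        if st.1 < 2 ∧ i ∈ m then (st.1 + 1, st.2 ++ [i]) else st) (n, L)
      = (n + (cap2 m cs n).length, L ++ cap2 m cs n) := by
  induction cs generalizing n L with
  | nil => simp [cap2]
  | cons c t ih =>
    rw [List.foldl_cons]
    by_cases h : n < 2 ∧ c ∈ m
    · have hc : cap2 m (c :: t) n = c :: cap2 m t (n + 1) := by rw [cap2, if_pos h]
      rw [if_pos h, ih, hc]
      simp only [Prod.mk.injEq, List.length_cons, List.append_assoc, List.singleton_append]
      exact ⟨by omega, by simp⟩
    · have hc : cap2 m (c :: t) n = cap2 m t n := by rw [cap2, if_neg h]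
      rw [if_neg h, ih, hc]

-- B's single loop computes (capped letters, all digits)
theorem foldB (cs : List Char) (l d : List Char) :
    cs.foldl (fun (st : List Char × List Char) c =>
        if c ∈ "abcdef".toList ∧ st.1.length < 2 then (st.1 ++ [c], st.2)
        else if c ∈ "0123456789".toList then (st.1, st.2 ++ [c]) else st) (l, d)
      = (l ++ cap2 ("abcdef".toList) cs l.length,
         d ++ cs.filter (· ∈ "0123456789".toList)) := by
  induction cs generalizing l d with
  | nil => simp [cap2]
  | cons c t ih =>
    rw [List.foldl_cons]
    show List.foldl _ (if c ∈ "abcdef".toList ∧ l.length < 2 then (l ++ [c], d)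
        else if c ∈ "0123456789".toList then (l, d ++ [c]) else (l, d)) t = _
    by_cases hl : c ∈ "abcdef".toList ∧ l.length < 2
    · have hnd : ¬ (c ∈ "0123456789".toList) := by
        have hl' : c ∈ ['a','b','c','d','e','f'] := hl.1
        simp only [List.mem_cons, List.not_mem_nil, or_false] at hl'
        rcases hl' with h|h|h|h|h|h <;> subst h <;> decide
      have hcap : cap2 ("abcdef".toList) (c :: t) l.length
          = c :: cap2 ("abcdef".toList) t (l.length + 1) := by
        rw [cap2, if_pos ⟨hl.2, hl.1⟩]
      rw [if_pos hl, ih, hcap, List.filter_cons_of_neg (by simpa using hnd)]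
      simp
    · by_cases hd : c ∈ "0123456789".toList
      · have hnl : ¬ (c ∈ "abcdef".toList) := by
          intro hh
          have hh' : c ∈ ['a','b','c','d','e','f'] := hh
          have hd' : c ∈ ['0','1','2','3','4','5','6','7','8','9'] := hd
          simp only [List.mem_cons, List.not_mem_nil, or_false] at hh'
          rcases hh' with h|h|h|h|h|h <;> subst h <;> simp at hd'
        have hcap : cap2 ("abcdef".toList) (c :: t) l.length
            = cap2 ("abcdef".toList) t l.length := by
          rw [cap2, if_neg (fun h => hnl h.2)]
        rw [if_neg hl, if_pos hd, ih, hcap, List.filter_cons_of_pos (by simpa using hd)]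
        simp
      · have hcap : cap2 ("abcdef".toList) (c :: t) l.length
            = cap2 ("abcdef".toList) t l.length := by
          rw [cap2, if_neg (fun h => hl ⟨h.2, h.1⟩)]
        rw [if_neg hl, if_neg hd, ih, hcap, List.filter_cons_of_neg (by simpa using hd)]

-- cap2 starting from 0 is 'take 2 of the filter'
theorem cap2_eq_take_filter (m : List Char) (cs : List Char) (n : Nat) :
    cap2 m cs n = (cs.filter (· ∈ m)).take (2 - n) := by
  induction cs generalizing n with
  | nil => simp [cap2]
  | cons c t ih =>
    by_cases hc : c ∈ m
    · by_cases hn : n < 2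
      · have h2 : 2 - n = (2 - (n + 1)) + 1 := by omega
        rw [cap2, if_pos ⟨hn, hc⟩, List.filter_cons_of_pos (by simpa using hc), h2,
          List.take_succ_cons, ih]
      · have h2 : 2 - n = 0 := by omega
        rw [cap2, if_neg (fun h => hn h.1), List.filter_cons_of_pos (by simpa using hc), h2,
          List.take_zero, ih]
        simp [Nat.sub_eq_zero_of_le (by omega : 2 ≤ n)]
    · rw [cap2, if_neg (fun h => hc h.2), List.filter_cons_of_neg (by simpa using hc), ih]

-- A's literal letter loop body is pointwise the collapsed step
theorem stepA_L :
    (fun (st : Nat × List Char) i => if st.1 < 2 then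
        ("abcdef".toList).foldl (fun st2 x => if i = x then (st2.1 + 1, st2.2 ++ [i]) else st2) st
      else st)
      = fun (st : Nat × List Char) i =>
          if st.1 < 2 ∧ i ∈ "abcdef".toList then (st.1 + 1, st.2 ++ [i]) else st := by
  funext st i
  by_cases h1 : st.1 < 2
  · rw [if_pos h1, innerL]
    by_cases h2 : i ∈ "abcdef".toList
    · rw [if_pos h2, if_pos ⟨h1, h2⟩]
    · rw [if_neg h2, if_neg (fun h => h2 h.2)]
  · rw [if_neg h1, if_neg (fun h => h1 h.1)]

-- A's literal digit loop body is pointwise the collapsed step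
theorem stepA_D :
    (fun (st : Nat × List Char) j => if st.1 < 2 then
        ("0123456789".toList).foldl (fun st2 x => if j = x then (st2.1 + 1, st2.2 ++ [j]) else st2) st
      else st)
      = fun (st : Nat × List Char) j =>
          if st.1 < 2 ∧ j ∈ "0123456789".toList then (st.1 + 1, st.2 ++ [j]) else st := by
  funext st j
  by_cases h1 : st.1 < 2
  · rw [if_pos h1, innerD]
    by_cases h2 : j ∈ "0123456789".toList
    · rw [if_pos h2, if_pos ⟨h1, h2⟩]
    · rw [if_neg h2, if_neg (fun h => h2 h.2)]
  · rw [if_neg h1, if_neg (fun h => h1 h.1)]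

-- ===== VERDICT (by name: the statement is the Claim_ definition above) =====
theorem findFirstLetters_spec : Claim_equal_findFirstLetters := by
  intro h_ _
  unfold Spec_findFirstLetters findFirstLetters findFirstLetters_alt
  show String.ofList (h_.toList.reverse.foldl _ (0, (h_.toList.foldl _ ((0 : Nat), ([] : List Char))).2)).2
      = String.ofList ((h_.toList.foldl _ (([] : List Char), ([] : List Char))).1 ++ _)
  rw [stepA_L, stepA_D, foldStep, foldStep, foldB]
  simp only [List.length_nil, List.nil_append]
  rw [cap2_eq_take_filter ("0123456789".toList) h_.toList.reverse 0]
  simp [List.filter_reverse]
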